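-- pv_equiv track=rewrite | github.com/dav2019/Python3_CodeChallenges | loops.py | delete_starting_evens
-- ===== SOURCE A (Python) =====
-- def delete_starting_evens(lst):
--   i = 0
--   while i < len(lst):
--     if(lst[i] % 2 != 0):
--       break
--     else:
--       lst.pop(i)
--   return lst
-- ===== SOURCE B (Python) =====
-- def delete_starting_evens(lst):
--   # find index of first odd element (front-to-back), then one bulk deletion
--   i = len(lst)
--   for j, x in enumerate(lst):
--     if x % 2 != 0:
--       i = j
--       break
--   del lst[:i]
--   return lst
-- ===== Notes on version B (the rewrite author's own statement) =====
-- stated objective: alternative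
-- what changed: B scans once for the index of the first odd element and removes the leading evens with a single bulk del lst[:i], instead of A's loop of repeated lst.pop(0) calls that each shift the remaining list.
import Mathlib
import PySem

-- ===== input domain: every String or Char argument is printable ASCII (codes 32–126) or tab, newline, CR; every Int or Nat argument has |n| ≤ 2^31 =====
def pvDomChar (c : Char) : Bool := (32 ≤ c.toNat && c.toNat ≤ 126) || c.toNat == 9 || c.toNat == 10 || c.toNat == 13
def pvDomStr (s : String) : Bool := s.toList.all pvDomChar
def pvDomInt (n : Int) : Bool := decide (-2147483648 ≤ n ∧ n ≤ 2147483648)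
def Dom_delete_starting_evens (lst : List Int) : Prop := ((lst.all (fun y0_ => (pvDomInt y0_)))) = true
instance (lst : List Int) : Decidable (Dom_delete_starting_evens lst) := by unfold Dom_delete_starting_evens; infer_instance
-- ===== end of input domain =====

-- B finds the index of the first odd element in one scan and deletes the leading evens
-- with a single bulk `del lst[:i]`, instead of A's repeated pop(0); equivalence is about
-- the return value (both mutate the same list to the same final contents).

-- ===== PORT A =====
-- A's while-loop: i stays 0 (each pop(0) shifts the list), so it repeatedly inspects the
-- head: break if odd, otherwise pop it.
def delete_starting_evens (lst : List Int) : List Int :=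
  match lst with
  | [] => lst
  | x :: xs => if PySem.Int.mod x 2 ≠ 0 then x :: xs else delete_starting_evens xs

-- ===== PORT B =====
-- B's first loop: index of the first odd element (length if none).
def pvFirstOddIdx (lst : List Int) : Nat :=
  match lst with
  | [] => 0
  | x :: xs => if PySem.Int.mod x 2 ≠ 0 then 0 else pvFirstOddIdx xs + 1

-- del lst[:i]; return lst
def delete_starting_evens_alt (lst : List Int) : List Int :=
  lst.drop (pvFirstOddIdx lst)

-- ===== PRECONDITION & SPEC =====
def Spec_delete_starting_evens (lst : List Int) (out : List Int) : Prop := out = delete_starting_evens_alt lst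
instance (lst : List Int) (out : List Int) : Decidable (Spec_delete_starting_evens lst out) := by unfold Spec_delete_starting_evens; infer_instance

-- ===== CLAIM (what is proved, stated in full; the proofs are below) =====
def Claim_equal_delete_starting_evens : Prop := ∀ (lst : List Int), Dom_delete_starting_evens lst → Spec_delete_starting_evens lst (delete_starting_evens lst)

-- ===== LEMMAS AND PROOFS =====
theorem pv_eq (lst : List Int) : delete_starting_evens lst = delete_starting_evens_alt lst := by
  induction lst with
  | nil => rfl
  | cons x xs ih =>
      unfold delete_starting_evens delete_starting_evens_alt pvFirstOddIdx
      split_ifs with h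
      · rfl
      · simpa [delete_starting_evens_alt] using ih

-- ===== VERDICT (by name: the statement is the Claim_ definition above) =====
theorem delete_starting_evens_spec : Claim_equal_delete_starting_evens := by
  intro lst _
  exact pv_eq lst
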